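-- pv_equiv track=rewrite | github.com/Khalife/nel_kb_data | entity_filtering_v2.py | acronymTest
-- ===== SOURCE A (Python) =====
-- def acronymTest(str1, main_type):
--     distances = []
--     nb_letters = len(str1)
--     i = 0
--     index = -1
--     while i < nb_letters:
--         if index < 0:
--             if str1[i].isupper():
--                 index += 1
--         else:
--             if str1[i].isupper():
--                 distances.append(i-index)
--                 index = i
--         i += 1
--
--     if main_type == "PER":
--         max_distances = 4
--
--     if main_type == "ORG":
--         max_distances = 5
--
--     if main_type == "GPE":
--         max_distances = 4
--
--     if main_type == "UKN":
--         max_distances = 4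
--
--     return distances, (len(distances) > 0) and ( sum(distances) <= len(distances) ) and ( len(distances) < max_distances ) #and ( len(distances) <= 5 )
-- ===== SOURCE B (Python) =====
-- def acronymTest(str1, main_type):
--     # Split the string into the segments of non-uppercase characters that the
--     # uppercase letters delimit; distances are read off the segment lengths and
--     # the flag is a closed-form property of the segment structure.
--     parts = []
--     cur = ''
--     for c in str1:
--         if c.isupper():
--             parts.append(cur)
--             cur = ''
--         else:
--             cur += c
--     parts.append(cur)
--     k = len(parts) - 1  # number of uppercase letters
--     if k >= 2:
--         distances = [len(parts[0]) + 1 + len(parts[1])] + [1 + len(p) for p in parts[2:-1]]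
--     else:
--         distances = []
--     MAXD = {"PER": 4, "ORG": 5, "GPE": 4, "UKN": 4}
--     flag = k >= 2 and all(p == '' for p in parts[:-1]) and k - 1 < MAXD[main_type]
--     return distances, flag
-- ===== Notes on version B (the rewrite author's own statement) =====
-- stated objective: alternative
-- what changed: Instead of tracking capital positions and differencing them, B splits the string into the non-uppercase segments delimited by capitals and reads the distances off the segment lengths; the flag is computed in closed form from the segment structure (all segments before the last empty, i.e. the capitals form a prefix run) instead of summing the distance list.
-- outside the precondition, e.g. on acronymTest('AB', 'XXX'): A raises UnboundLocalError, B raises KeyError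
import Mathlib
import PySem

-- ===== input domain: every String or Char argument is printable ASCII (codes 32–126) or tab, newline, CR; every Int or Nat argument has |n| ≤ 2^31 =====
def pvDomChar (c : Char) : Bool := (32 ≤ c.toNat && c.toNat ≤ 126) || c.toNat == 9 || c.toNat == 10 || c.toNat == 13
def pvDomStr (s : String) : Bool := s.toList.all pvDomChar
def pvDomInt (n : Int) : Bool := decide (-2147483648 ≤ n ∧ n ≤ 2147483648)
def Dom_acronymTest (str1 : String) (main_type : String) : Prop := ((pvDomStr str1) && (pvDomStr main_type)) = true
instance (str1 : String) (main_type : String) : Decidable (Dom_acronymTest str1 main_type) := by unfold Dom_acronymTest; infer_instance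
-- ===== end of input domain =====

-- B replaces A's position-differencing while-loop by a different algorithm: split the
-- string into the non-uppercase segments delimited by capitals, read the distances off
-- the segment lengths, and compute the flag in closed form from the segment structure
-- (objective: alternative; same asymptotic cost).

-- ===== PORT A =====
-- A's while-loop: counter i, marker `index` (-1 until the first capital, then 0, then the
-- previous capital's position), accumulator `distances`.
def acronymTestLoop (chars : List Char) (i : Int) (index : Int) (distances : List Int) : List Int :=
  match chars with
  | [] => distances
  | c :: rest =>
    if index < 0 then
      if PySem.Chars.isupper c then acronymTestLoop rest (i+1) (index+1) distances
      else acronymTestLoop rest (i+1) index distances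
    else
      if PySem.Chars.isupper c then acronymTestLoop rest (i+1) i (distances ++ [i - index])
      else acronymTestLoop rest (i+1) index distances

def acronymTest (str1 : String) (main_type : String) : List Int × Bool :=
  let distances := acronymTestLoop str1.toList 0 (-1) []
  -- the if-chain assigning max_distances; `none` = never assigned (UnboundLocalError in
  -- Python, reachable only outside Pre_acronymTest; the port returns false there)
  let md1 : Option Int := if main_type = "PER" then some 4 else none
  let md2 : Option Int := if main_type = "ORG" then some 5 else md1
  let md3 : Option Int := if main_type = "GPE" then some 4 else md2
  let md4 : Option Int := if main_type = "UKN" then some 4 else md3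
  (distances,
    decide (0 < distances.length) &&
    decide (distances.sum ≤ (distances.length : Int)) &&
    (match md4 with
     | some m => decide ((distances.length : Int) < m)
     | none => false))

-- ===== PORT B =====
-- the for-loop of Source B: parts/cur accumulator, final `parts.append(cur)`
def bSplitGo (chars : List Char) (parts : List (List Char)) (cur : List Char) : List (List Char) :=
  match chars with
  | [] => parts ++ [cur]
  | c :: rest =>
    if PySem.Chars.isupper c then bSplitGo rest (parts ++ [cur]) []
    else bSplitGo rest parts (cur ++ [c])

-- MAXD = {"PER": 4, "ORG": 5, "GPE": 4, "UKN": 4}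
def altMAXD : PySem.Dict String Int :=
  ((((PySem.Dict.empty).insert "PER" 4).insert "ORG" 5).insert "GPE" 4).insert "UKN" 4

def acronymTest_alt (str1 : String) (main_type : String) : List Int × Bool :=
  let parts := bSplitGo str1.toList [] []
  let k : Int := (parts.length : Int) - 1
  -- distances = [len(parts[0]) + 1 + len(parts[1])] + [1 + len(p) for p in parts[2:-1]]
  let distances : List Int :=
    if 2 ≤ k then
      match parts with
      | p0 :: p1 :: _ =>
        ((p0.length : Int) + 1 + (p1.length : Int)) ::
          (PySem.List.slice parts (some 2) (some (-1))).map (fun p => 1 + (p.length : Int))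
      | _ => []   -- unreachable: 2 ≤ k forces at least three parts
    else []
  -- flag = k >= 2 and all(p == '' for p in parts[:-1]) and k - 1 < MAXD[main_type]
  (distances,
    decide (2 ≤ k) &&
    (PySem.List.slice parts none (some (-1))).all (fun p => decide (p = ([] : List Char))) &&
    (match PySem.Dict.get? altMAXD main_type with
     | some m => decide (k - 1 < m)
     | none => false))   -- KeyError, reachable only outside Pre_acronymTest

-- ===== PRECONDITION & SPEC =====
-- positions of the uppercase characters of s (used only by Pre_acronymTest)
def preUps (s : String) : List Nat :=
  (s.toList.zipIdx.filter (fun p => PySem.Chars.isupper p.1)).map (fun p => p.2)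

-- Pre_ excludes exactly the inputs on which A raises (UnboundLocalError: unknown main_type
-- reached after a string with ≥ 2 capitals whose last capital sits at position ≤ count-1);
-- B raises KeyError on the same inputs.
def Pre_acronymTest (str1 : String) (main_type : String) : Prop :=
  main_type = "PER" ∨ main_type = "ORG" ∨ main_type = "GPE" ∨ main_type = "UKN" ∨
  ¬ (2 ≤ (preUps str1).length ∧ (preUps str1).getLast?.getD 0 + 1 ≤ (preUps str1).length)

instance (str1 : String) (main_type : String) : Decidable (Pre_acronymTest str1 main_type) := by
  unfold Pre_acronymTest; infer_instance

def pvWitness_acronymTest : String × String := ("NATO", "ORG")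

def Spec_acronymTest (str1 : String) (main_type : String) (out : List Int × Bool) : Prop := out = acronymTest_alt str1 main_type
instance (str1 : String) (main_type : String) (out : List Int × Bool) : Decidable (Spec_acronymTest str1 main_type out) := by unfold Spec_acronymTest; infer_instance

-- ===== CLAIM (what is proved, stated in full; the proofs are below) =====
def Claim_equal_acronymTest : Prop := ∀ (str1 : String) (main_type : String), Dom_acronymTest str1 main_type → Pre_acronymTest str1 main_type → Spec_acronymTest str1 main_type (acronymTest str1 main_type)

-- ===== LEMMAS AND PROOFS =====

-- canonical segment list: non-uppercase segments delimited by the capitals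
def bSegs : List Char → List Char → List (List Char)
  | [], cur => [cur]
  | c :: r, cur => if PySem.Chars.isupper c then cur :: bSegs r [] else bSegs r (cur ++ [c])

theorem bSplitGo_eq (l : List Char) (parts : List (List Char)) (cur : List Char) :
    bSplitGo l parts cur = parts ++ bSegs l cur := by
  induction l generalizing parts cur with
  | nil => rfl
  | cons c r ih =>
    by_cases hc : PySem.Chars.isupper c = true
    · simp [bSplitGo, bSegs, hc, ih]
    · simp [bSplitGo, bSegs, hc, ih]

theorem bSegs_ne_nil (l : List Char) (cur : List Char) : bSegs l cur ≠ [] := by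
  induction l generalizing cur with
  | nil => simp [bSegs]
  | cons c r ih =>
    by_cases hc : PySem.Chars.isupper c = true <;> simp [bSegs, hc, ih]

-- A's emission once a capital has been seen: for each capital at position p emit p - idx
def gDiffs : List Char → Int → Int → List Int
  | [], _, _ => []
  | c :: r, i, idx => if PySem.Chars.isupper c then (i - idx) :: gDiffs r (i+1) i else gDiffs r (i+1) idx

theorem loop_of_nonneg (l : List Char) (i idx : Int) (ds : List Int)
    (hi : 0 ≤ i) (h : 0 ≤ idx) :
    acronymTestLoop l i idx ds = ds ++ gDiffs l i idx := by
  induction l generalizing i idx ds with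
  | nil => simp [acronymTestLoop, gDiffs]
  | cons c r ih =>
    rw [acronymTestLoop, gDiffs, if_neg (show ¬ idx < 0 by omega)]
    by_cases hc : PySem.Chars.isupper c = true
    · rw [if_pos hc, if_pos hc, ih (i+1) i _ (by omega) (by omega)]
      simp
    · rw [if_neg hc, if_neg hc]
      exact ih (i+1) idx ds (by omega) h

-- the distances read off a segment list, first one measured from `c`
def diffsOf : List (List Char) → Int → List Int
  | [], _ => []
  | [_], _ => []
  | s :: t :: r, c => (c + s.length) :: diffsOf (t :: r) 1

theorem gDiffs_eq_diffsOf (l : List Char) (cur : List Char) (i idx : Int) :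
    gDiffs l i idx = diffsOf (bSegs l cur) (i - idx - cur.length) := by
  induction l generalizing cur i idx with
  | nil => rfl
  | cons c r ih =>
    by_cases hc : PySem.Chars.isupper c = true
    · rw [gDiffs, if_pos hc, bSegs, if_pos hc]
      obtain ⟨t, r', ht⟩ : ∃ t r', bSegs r [] = t :: r' := by
        cases h : bSegs r [] with
        | nil => exact absurd h (bSegs_ne_nil r [])
        | cons t r' => exact ⟨t, r', rfl⟩
      have h1 : gDiffs r (i+1) i = diffsOf (bSegs r []) 1 := by
        rw [ih ([]) (i+1) i]; norm_num
      rw [ht, diffsOf, ← ht, ← h1]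
      congr 1
      ring
    · rw [gDiffs, if_neg hc, bSegs, if_neg hc, ih (cur ++ [c]) (i+1) idx]
      congr 1
      push_cast [List.length_append, List.length_cons, List.length_nil]
      ring

-- A's whole loop (index = -1 start) in terms of the segment list
def startDiffs : List (List Char) → Int → List Int
  | [], _ => []
  | [_], _ => []
  | s :: t :: r, base => diffsOf (t :: r) (base + s.length + 1)

theorem loop_start (l : List Char) (cur : List Char) (i : Int) (hi : 0 ≤ i) :
    acronymTestLoop l i (-1) [] = startDiffs (bSegs l cur) (i - cur.length) := by
  induction l generalizing cur i with
  | nil => rfl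
  | cons c r ih =>
    by_cases hc : PySem.Chars.isupper c = true
    · rw [acronymTestLoop, if_pos (show (-1:Int) < 0 by norm_num), if_pos hc,
        show (-1:Int) + 1 = 0 by norm_num,
        loop_of_nonneg r (i+1) 0 [] (by omega) le_rfl, List.nil_append,
        gDiffs_eq_diffsOf r [] (i+1) 0, bSegs, if_pos hc]
      obtain ⟨t, r', ht⟩ : ∃ t r', bSegs r [] = t :: r' := by
        cases h : bSegs r [] with
        | nil => exact absurd h (bSegs_ne_nil r [])
        | cons t r' => exact ⟨t, r', rfl⟩
      rw [ht, startDiffs, ← ht]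
      congr 1
      push_cast [List.length_nil]
      ring
    · rw [acronymTestLoop, if_pos (show (-1:Int) < 0 by norm_num), if_neg hc, bSegs, if_neg hc,
        ih (cur ++ [c]) (i+1) (by omega)]
      congr 1
      push_cast [List.length_append, List.length_cons, List.length_nil]
      ring

theorem diffsOf_one (L : List (List Char)) :
    diffsOf L 1 = L.dropLast.map (fun s => 1 + (s.length : Int)) := by
  induction L with
  | nil => rfl
  | cons s L' ih =>
    cases L' with
    | nil => rfl
    | cons t r => rw [diffsOf, ih, List.dropLast_cons₂, List.map_cons]

theorem slice_two_neg_one (xs : List (List Char)) :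
    PySem.List.slice xs (some 2) (some (-1)) = (xs.drop 2).dropLast := by
  unfold PySem.List.slice PySem.List.clampIdx
  match xs with
  | [] => rfl
  | [a] => rfl
  | a :: b :: r =>
    simp [List.dropLast_eq_take]
    rw [if_neg (by omega)]
    omega

-- the two distance computations agree on every segment list
theorem distances_eq (parts : List (List Char)) :
    startDiffs parts 0
      = (if 2 ≤ (parts.length : Int) - 1 then
          match parts with
          | p0 :: p1 :: _ =>
            ((p0.length : Int) + 1 + (p1.length : Int)) ::
              (PySem.List.slice parts (some 2) (some (-1))).map (fun p => 1 + (p.length : Int))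
          | _ => []
        else []) := by
  match parts with
  | [] => rfl
  | [p0] => rfl
  | [p0, p1] => simp [startDiffs, diffsOf]
  | p0 :: p1 :: p2 :: r =>
    rw [if_pos (by simp; omega), startDiffs, diffsOf, diffsOf_one, slice_two_neg_one]
    simp

-- A's if-chain and B's dict produce the same optional bound for every main_type
theorem md_eq (mt : String) :
    (if mt = "UKN" then some (4:Int) else
      if mt = "GPE" then some 4 else
        if mt = "ORG" then some 5 else
          if mt = "PER" then some 4 else none)
      = PySem.Dict.get? altMAXD mt := by
  unfold altMAXD
  by_cases h4 : mt = "UKN"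
  · subst h4; rw [if_pos rfl, PySem.Dict.get?_insert_self]
  · rw [if_neg h4, PySem.Dict.get?_insert_of_ne _ _ h4]
    by_cases h3 : mt = "GPE"
    · subst h3; rw [if_pos rfl, PySem.Dict.get?_insert_self]
    · rw [if_neg h3, PySem.Dict.get?_insert_of_ne _ _ h3]
      by_cases h2 : mt = "ORG"
      · subst h2; rw [if_pos rfl, PySem.Dict.get?_insert_self]
      · rw [if_neg h2, PySem.Dict.get?_insert_of_ne _ _ h2]
        by_cases h1 : mt = "PER"
        · subst h1; rw [if_pos rfl, PySem.Dict.get?_insert_self]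
        · rw [if_neg h1, PySem.Dict.get?_insert_of_ne _ _ h1, PySem.Dict.get?_empty]

theorem sum_one_add_len (L : List (List Char)) :
    (L.map (fun s => 1 + (s.length : Int))).sum
      = (L.length : Int) + (L.map (fun s => (s.length : Int))).sum := by
  induction L with
  | nil => simp
  | cons s L' ih => simp [ih]; ring

theorem sumlen_le_zero (L : List (List Char)) :
    ((L.map (fun s => (s.length : Int))).sum ≤ 0)
      ↔ (L.all (fun p => decide (p = ([] : List Char))) = true) := by
  induction L with
  | nil => simp
  | cons s L' ih =>
    have h1 : (0:Int) ≤ (L'.map (fun s => (s.length : Int))).sum :=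
      List.sum_nonneg (by intro x hx; simp at hx; obtain ⟨a, _, rfl⟩ := hx; positivity)
    simp only [List.map_cons, List.sum_cons, List.all_cons, Bool.and_eq_true, decide_eq_true_eq]
    constructor
    · intro h
      have hs : s.length = 0 := by omega
      exact ⟨List.eq_nil_iff_length_eq_zero.mpr hs, ih.mp (by omega)⟩
    · rintro ⟨hs, hall⟩
      have h2 := ih.mpr hall
      subst hs
      simpa using h2

-- the two flag computations agree for every segment list and every optional bound
theorem flag_eq (parts : List (List Char)) (md : Option Int) :
    (decide (0 < (startDiffs parts 0).length) &&
      decide ((startDiffs parts 0).sum ≤ ((startDiffs parts 0).length : Int)) &&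
      (match md with
       | some m => decide (((startDiffs parts 0).length : Int) < m)
       | none => false))
      = (decide (2 ≤ (parts.length : Int) - 1) &&
         (PySem.List.slice parts none (some (-1))).all (fun p => decide (p = ([] : List Char))) &&
         (match md with
          | some m => decide ((parts.length : Int) - 1 - 1 < m)
          | none => false)) := by
  match parts with
  | [] => cases md <;> norm_num [startDiffs]
  | [p0] => cases md <;> norm_num [startDiffs]
  | [p0, p1] => cases md <;> norm_num [startDiffs, diffsOf]
  | p0 :: p1 :: p2 :: r =>
    rw [PySem.List.slice_to_neg_one, startDiffs, diffsOf, diffsOf_one,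
        List.dropLast_cons₂, List.dropLast_cons₂]
    simp only [zero_add]
    generalize hM : (p2 :: r).dropLast = M
    have hMl : M.length = r.length := by rw [← hM]; simp
    have hlen : (((p0.length : Int) + 1 + (p1.length : Int)) ::
        M.map (fun s => 1 + (s.length : Int))).length = M.length + 1 := by simp
    have htrue1 : decide (0 < (((p0.length : Int) + 1 + (p1.length : Int)) ::
        M.map (fun s => 1 + (s.length : Int))).length) = true := by simp
    have htrue2 : decide (2 ≤ ((p0 :: p1 :: p2 :: r).length : Int) - 1) = true := by
      rw [decide_eq_true_eq]
      simp only [List.length_cons]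
      push_cast
      omega
    rw [htrue1, htrue2, Bool.true_and, Bool.true_and]
    have hsum : (((p0.length : Int) + 1 + (p1.length : Int)) ::
        M.map (fun s => 1 + (s.length : Int))).sum
        = ((p0 :: p1 :: M).map (fun s => (s.length : Int))).sum + (M.length : Int) + 1 := by
      rw [List.sum_cons, sum_one_add_len]
      simp
      ring
    have hcond : decide ((((p0.length : Int) + 1 + (p1.length : Int)) ::
          M.map (fun s => 1 + (s.length : Int))).sum
            ≤ (((((p0.length : Int) + 1 + (p1.length : Int)) ::
              M.map (fun s => 1 + (s.length : Int))).length : Nat) : Int))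
        = ((p0 :: p1 :: M).all (fun p => decide (p = ([] : List Char)))) := by
      by_cases hb : ((p0 :: p1 :: M).all (fun p => decide (p = ([] : List Char)))) = true
      · rw [hb, decide_eq_true_eq]
        rw [hsum, hlen]
        have := (sumlen_le_zero (p0 :: p1 :: M)).mpr hb
        push_cast
        omega
      · have hbf : ((p0 :: p1 :: M).all (fun p => decide (p = ([] : List Char)))) = false := by
          revert hb
          cases ((p0 :: p1 :: M).all (fun p => decide (p = ([] : List Char)))) <;> simp
        rw [hbf]
        simp only [decide_eq_false_iff_not]
        intro hle
        rw [hsum, hlen] at hle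
        have hle0 : ((p0 :: p1 :: M).map (fun s => (s.length : Int))).sum ≤ 0 := by
          push_cast at hle
          omega
        rw [(sumlen_le_zero (p0 :: p1 :: M)).mp hle0] at hbf
        exact Bool.noConfusion hbf
    rw [hcond]
    cases md with
    | none => rfl
    | some m =>
      congr 1
      rw [decide_eq_decide, hlen]
      simp only [List.length_cons]
      push_cast
      omega

-- ===== VERDICT (by name: the statement is the Claim_ definition above) =====
theorem acronymTest_spec : Claim_equal_acronymTest := by
  intro str1 main_type _ _
  unfold Spec_acronymTest acronymTest acronymTest_alt
  dsimp only
  rw [bSplitGo_eq, List.nil_append, loop_start str1.toList [] 0 le_rfl, md_eq main_type,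
    Prod.mk.injEq]
  refine ⟨?_, ?_⟩
  · have := distances_eq (bSegs str1.toList [])
    simpa using this
  · have := flag_eq (bSegs str1.toList []) (PySem.Dict.get? altMAXD main_type)
    simpa using this
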